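-- pv_equiv track=rewrite | github.com/SemVan/PySpiker | pan_tompkins.py | prepare_indices
-- ===== SOURCE A (Python) =====
-- def prepare_indices(sg, ind):
--     full_ind = []
--     for i in range(len(sg)):
--         if i in ind:
--             full_ind.append(1)
--         else:
--             full_ind.append(0)
--     return full_ind
-- ===== SOURCE B (Python) =====
-- def prepare_indices(sg, ind):
--     n = len(sg)
--     full_ind = [0] * n
--     for j in ind:
--         if 0 <= j < n:
--             full_ind[j] = 1
--     return full_ind
-- ===== Notes on version B (the rewrite author's own statement) =====
-- stated objective: faster
-- what changed: Instead of scanning every dense index and testing membership in ind (a linear scan per index), B allocates a zero mask once and scatters 1s at the in-range positions listed in ind.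
import Mathlib
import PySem

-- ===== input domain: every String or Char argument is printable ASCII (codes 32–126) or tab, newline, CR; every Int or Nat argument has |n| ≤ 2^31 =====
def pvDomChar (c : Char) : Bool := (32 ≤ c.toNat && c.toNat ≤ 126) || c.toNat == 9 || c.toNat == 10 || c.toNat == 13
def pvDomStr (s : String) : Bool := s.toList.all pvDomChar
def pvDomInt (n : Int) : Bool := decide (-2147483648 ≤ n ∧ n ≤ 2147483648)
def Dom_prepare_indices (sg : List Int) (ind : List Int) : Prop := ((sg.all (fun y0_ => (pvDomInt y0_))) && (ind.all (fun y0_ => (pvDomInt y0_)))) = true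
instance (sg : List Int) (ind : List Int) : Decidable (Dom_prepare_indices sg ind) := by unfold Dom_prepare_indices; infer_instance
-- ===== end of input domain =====

-- B replaces A's dense scan (membership test per index) by a zero mask scattered with 1s
-- at the in-range positions of ind: faster when ind is sparse.

-- ===== PORT A =====
-- for i in range(len(sg)): append 1 if i in ind else 0
def prepare_indices (sg : List Int) (ind : List Int) : List Int :=
  (List.range sg.length).foldl
    (fun full_ind (i : Nat) => full_ind ++ [if (i : Int) ∈ ind then (1 : Int) else 0]) []

-- ===== PORT B =====
-- full_ind = [0]*len(sg); for j in ind: if 0 <= j < len(sg): full_ind[j] = 1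
def prepare_indices_alt (sg : List Int) (ind : List Int) : List Int :=
  ind.foldl
    (fun full_ind j =>
      if 0 ≤ j ∧ j < (sg.length : Int) then full_ind.set j.toNat 1 else full_ind)
    (List.replicate sg.length 0)

-- ===== PRECONDITION & SPEC =====
def Spec_prepare_indices (sg : List Int) (ind : List Int) (out : List Int) : Prop := out = prepare_indices_alt sg ind
instance (sg : List Int) (ind : List Int) (out : List Int) : Decidable (Spec_prepare_indices sg ind out) := by unfold Spec_prepare_indices; infer_instance

-- ===== CLAIM (what is proved, stated in full; the proofs are below) =====
def Claim_equal_prepare_indices : Prop := ∀ (sg : List Int) (ind : List Int), Dom_prepare_indices sg ind → Spec_prepare_indices sg ind (prepare_indices sg ind)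

-- ===== LEMMAS AND PROOFS =====

-- A's append-loop is a map over the range.
theorem pv_foldl_append_map {α β : Type} (g : α → β) :
    ∀ (l : List α) (acc : List β),
      l.foldl (fun r i => r ++ [g i]) acc = acc ++ l.map g := by
  intro l
  induction l with
  | nil => simp
  | cons x xs ih => intro acc; simp [List.foldl, ih]

theorem pv_scatter_length (sg : List Int) :
    ∀ (l : List Int) (acc : List Int),
      (l.foldl (fun full_ind j =>
        if 0 ≤ j ∧ j < (sg.length : Int) then full_ind.set j.toNat 1 else full_ind) acc).length
      = acc.length := by
  intro l
  induction l with
  | nil => intro acc; rfl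
  | cons x xs ih =>
    intro acc
    simp only [List.foldl]
    rw [ih]
    split <;> simp

-- value at index i of the scatter fold
theorem pv_scatter_get (sg : List Int) (i : Nat) :
    ∀ (l : List Int) (acc : List Int), acc.length = sg.length →
      (l.foldl (fun full_ind j =>
        if 0 ≤ j ∧ j < (sg.length : Int) then full_ind.set j.toNat 1 else full_ind) acc)[i]?
      = if (i : Int) ∈ l ∧ i < sg.length then some 1 else acc[i]? := by
  intro l
  induction l with
  | nil => intro acc _; simp
  | cons x xs ih =>
    intro acc hacc
    simp only [List.foldl]
    by_cases hg : 0 ≤ x ∧ x < (sg.length : Int)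
    · rw [if_pos hg]
      rw [ih _ (by simp [hacc])]
      by_cases hin : (i : Int) ∈ xs ∧ i < sg.length
      · rw [if_pos hin, if_pos ⟨List.mem_cons_of_mem _ hin.1, hin.2⟩]
      · rw [if_neg hin]
        by_cases hx : x = (i : Int)
        · have hti : x.toNat = i := by omega
          have hlt : i < sg.length := by omega
          rw [if_pos ⟨by rw [← hx]; exact List.mem_cons_self, hlt⟩]
          rw [hti, List.getElem?_set_self (by omega)]
        · have : x.toNat ≠ i := by omega
          rw [List.getElem?_set_ne this]
          by_cases hmem : (i : Int) ∈ x :: xs ∧ i < sg.length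
          · exfalso; rcases hmem with ⟨hm, hl⟩
            rcases List.mem_cons.mp hm with h | h
            · exact hx h.symm
            · exact hin ⟨h, hl⟩
          · rw [if_neg hmem]
    · rw [if_neg hg]
      rw [ih _ hacc]
      by_cases hin : (i : Int) ∈ xs ∧ i < sg.length
      · rw [if_pos hin, if_pos ⟨List.mem_cons_of_mem _ hin.1, hin.2⟩]
      · rw [if_neg hin]
        by_cases hmem : (i : Int) ∈ x :: xs ∧ i < sg.length
        · exfalso; rcases hmem with ⟨hm, hl⟩
          rcases List.mem_cons.mp hm with h | h
          · subst h; omega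
          · exact hin ⟨h, hl⟩
        · rw [if_neg hmem]

theorem pv_alt_eq_map (sg ind : List Int) :
    prepare_indices_alt sg ind
      = (List.range sg.length).map (fun (i : Nat) => if (i : Int) ∈ ind then (1 : Int) else 0) := by
  apply List.ext_getElem?
  intro i
  by_cases hi : i < sg.length
  · unfold prepare_indices_alt
    rw [pv_scatter_get sg i ind _ (by simp)]
    rw [List.getElem?_map, List.getElem?_range hi]
    by_cases hm : (i : Int) ∈ ind
    · rw [if_pos ⟨hm, hi⟩]; simp [hm]
    · rw [if_neg (fun h => hm h.1)]
      simp [hm, hi]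
  · have h1 : (prepare_indices_alt sg ind).length = sg.length := by
      unfold prepare_indices_alt; rw [pv_scatter_length]; simp
    rw [List.getElem?_eq_none (by omega), List.getElem?_eq_none (by simp; omega)]

-- ===== VERDICT (by name: the statement is the Claim_ definition above) =====
theorem prepare_indices_spec : Claim_equal_prepare_indices := by
  intro sg ind _
  unfold Spec_prepare_indices prepare_indices
  rw [pv_foldl_append_map, List.nil_append, pv_alt_eq_map]
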